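-- pv_equiv track=rewrite | github.com/giak/Truth-engine | archive/system/2025-12-14_publish_substack.py | extract_title_subtitle
-- ===== SOURCE A (Python) =====
-- def extract_title_subtitle(markdown_text):
--     lines = markdown_text.split('\n')
--     title = "Article sans titre"
--     subtitle = ""
--
--     for line in lines:
--         if line.startswith("# "):
--             title = line[2:].strip()
--             break
--
--     # For the Ducros article, extract subtitle from the introduction line
--     # The format is: "Une enquête révèle comment Emmanuelle Ducros..."
--     lines_after_title = []
--     title_found = False
--
--     for line in lines:
--         if line.startswith("# "):
--             title_found = True
--             continue
--         if title_found and line.strip():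
--             lines_after_title.append(line.strip())
--             if len(lines_after_title) >= 1:
--                 break
--
--     subtitle = lines_after_title[0] if lines_after_title else "Enquête sur les conflits d'intérêts"
--     return title, subtitle
-- ===== SOURCE B (Python) =====
-- def extract_title_subtitle(markdown_text):
--     title = "Article sans titre"
--     subtitle = None
--     seen_heading = False
--     for line in markdown_text.split('\n'):
--         if line.startswith("# "):
--             if not seen_heading:
--                 title = line[2:].strip()
--                 seen_heading = True
--             continue
--         if seen_heading and line.strip():
--             subtitle = line.strip()
--             break
--     return title, subtitle if subtitle is not None else "Enquête sur les conflits d'intérêts"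
-- ===== Notes on version B (the rewrite author's own statement) =====
-- stated objective: simpler
-- what changed: Replaces A's two separate scans over the lines (one for the title, one rebuilding a found-flag and an accumulator list for the subtitle) with a single fused pass keeping a seen_heading flag and an optional subtitle.
import Mathlib
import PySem

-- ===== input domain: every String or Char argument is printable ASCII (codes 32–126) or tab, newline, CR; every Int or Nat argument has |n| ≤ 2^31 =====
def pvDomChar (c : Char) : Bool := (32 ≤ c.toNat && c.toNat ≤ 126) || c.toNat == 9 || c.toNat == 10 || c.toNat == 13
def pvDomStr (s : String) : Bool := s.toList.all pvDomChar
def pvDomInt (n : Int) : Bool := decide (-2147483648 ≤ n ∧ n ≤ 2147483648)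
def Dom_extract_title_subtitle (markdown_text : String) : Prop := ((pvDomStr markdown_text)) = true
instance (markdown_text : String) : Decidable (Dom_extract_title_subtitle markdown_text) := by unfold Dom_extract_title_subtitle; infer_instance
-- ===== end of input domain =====

-- B fuses A's two scans of the lines into one pass; same return value, no speed claim.

-- ===== PORT A =====
-- first loop: find the first '# ' heading, take its stripped tail as the title
def pvTitleLoopA : List String → String
  | [] => "Article sans titre"
  | l :: ls =>
    if PySem.Str.startswith l "# " then PySem.Str.strip (PySem.Str.slice l (some 2) none)
    else pvTitleLoopA ls

-- second loop: title_found flag + lines_after_title accumulator, break after the first append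
def pvSubLoopA : List String → Bool → List String → List String
  | [], _, acc => acc
  | l :: ls, found, acc =>
    if PySem.Str.startswith l "# " then pvSubLoopA ls true acc
    else if found = true ∧ PySem.Str.strip l ≠ "" then
      let acc' := acc ++ [PySem.Str.strip l]
      if acc'.length ≥ 1 then acc' else pvSubLoopA ls found acc'
    else pvSubLoopA ls found acc

def extract_title_subtitle (markdown_text : String) : String × String :=
  let lines := (PySem.Str.split? markdown_text "\n").getD []  -- sep "\n" ≠ "": split? is always some; getD only discharges the Option
  let title := pvTitleLoopA lines
  let lines_after_title := pvSubLoopA lines false []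
  let subtitle := match lines_after_title with
    | x :: _ => x
    | [] => "Enquête sur les conflits d'intérêts"
  (title, subtitle)

-- ===== PORT B =====
-- single pass: seen_heading flag, title accumulator, optional subtitle; break at the subtitle
def pvLoopB : List String → Bool → String → String × Option String
  | [], _, title => (title, none)
  | l :: ls, seen, title =>
    if PySem.Str.startswith l "# " then
      if seen then pvLoopB ls seen title
      else pvLoopB ls true (PySem.Str.strip (PySem.Str.slice l (some 2) none))
    else if seen = true ∧ PySem.Str.strip l ≠ "" then (title, some (PySem.Str.strip l))
    else pvLoopB ls seen title

def extract_title_subtitle_alt (markdown_text : String) : String × String :=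
  let r := pvLoopB ((PySem.Str.split? markdown_text "\n").getD []) false "Article sans titre"
  (r.1, r.2.getD "Enquête sur les conflits d'intérêts")

-- ===== PRECONDITION & SPEC =====
def Spec_extract_title_subtitle (markdown_text : String) (out : String × String) : Prop := out = extract_title_subtitle_alt markdown_text
instance (markdown_text : String) (out : String × String) : Decidable (Spec_extract_title_subtitle markdown_text out) := by unfold Spec_extract_title_subtitle; infer_instance

-- ===== CLAIM (what is proved, stated in full; the proofs are below) =====
def Claim_equal_extract_title_subtitle : Prop := ∀ (markdown_text : String), Dom_extract_title_subtitle markdown_text → Spec_extract_title_subtitle markdown_text (extract_title_subtitle markdown_text)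

-- ===== LEMMAS AND PROOFS =====

-- after the first heading, B's loop returns the fixed title and the head of A's second loop
theorem pvLoopB_true (ls : List String) (t : String) :
    pvLoopB ls true t = (t, (pvSubLoopA ls true []).head?) := by
  induction ls with
  | nil => simp [pvLoopB, pvSubLoopA]
  | cons l ls ih =>
    by_cases h : PySem.Chars.startswith l.toList ['#', ' '] = true
    · simp [pvLoopB, pvSubLoopA, h, ih]
    · by_cases h2 : PySem.Str.strip l = ""
      · simp [pvLoopB, pvSubLoopA, h, h2, ih]
      · simp [pvLoopB, pvSubLoopA, h, h2]

-- before any heading, B's loop computes A's two loops at once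
theorem pvLoopB_false (ls : List String) (t : String) :
    pvLoopB ls false t =
      ((match ls.find? (fun l => PySem.Chars.startswith l.toList ['#', ' ']) with
        | some _ => pvTitleLoopA ls
        | none => t),
       (pvSubLoopA ls false []).head?) := by
  induction ls with
  | nil => simp [pvLoopB, pvSubLoopA]
  | cons l ls ih =>
    by_cases h : PySem.Chars.startswith l.toList ['#', ' '] = true
    · simp [pvLoopB, pvSubLoopA, pvTitleLoopA, h, List.find?, pvLoopB_true]
    · simp [pvLoopB, pvSubLoopA, pvTitleLoopA, h, List.find?, ih]

-- when no heading exists, A's title loop returns the default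
theorem pvTitleLoopA_none (ls : List String)
    (h : ∀ x ∈ ls, PySem.Chars.startswith x.toList ['#', ' '] = false) :
    pvTitleLoopA ls = "Article sans titre" := by
  induction ls with
  | nil => rfl
  | cons l ls ih =>
    have hl := h l (by simp)
    simp [pvTitleLoopA, hl, ih (fun x hx => h x (by simp [hx]))]

-- ===== VERDICT (by name: the statement is the Claim_ definition above) =====
theorem extract_title_subtitle_spec : Claim_equal_extract_title_subtitle := by
  intro md _
  unfold Spec_extract_title_subtitle extract_title_subtitle extract_title_subtitle_alt
  rw [pvLoopB_false]
  cases hf : ((PySem.Str.split? md "\n").getD []).find? (fun l => PySem.Chars.startswith l.toList ['#', ' ']) with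
  | some _ => cases h : (pvSubLoopA ((PySem.Str.split? md "\n").getD []) false []) <;> simp [h]
  | none =>
    cases h : (pvSubLoopA ((PySem.Str.split? md "\n").getD []) false []) <;>
      simp [h, pvTitleLoopA_none _ (fun x hx => Bool.not_eq_true _ ▸ List.find?_eq_none.mp hf x hx)]
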